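-- pv_equiv track=rewrite | github.com/ExDevPro/s954785 | ui/subject_manager_improved.py | _categorize_subject
-- ===== SOURCE A (Python) =====
-- def _categorize_subject(subject: str) -> str:
--     """Categorize subject based on content"""
--     subject_lower = subject.lower()
--
--     if any(word in subject_lower for word in ['offer', 'sale', 'discount', 'deal', '%', 'save']):
--         return "Promotional"
--     elif any(word in subject_lower for word in ['welcome', 'hello', 'hi', 'greetings']):
--         return "Welcome"
--     elif any(word in subject_lower for word in ['update', 'news', 'newsletter', 'announcement']):
--         return "Newsletter"
--     elif any(word in subject_lower for word in ['urgent', 'important', 'action required', 'expires']):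
--         return "Urgent"
--     elif '?' in subject:
--         return "Question"
--     else:
--         return "General"
-- ===== SOURCE B (Python) =====
-- _KEYWORD_PRIORITY = {
--     'offer': 0, 'sale': 0, 'discount': 0, 'deal': 0, '%': 0, 'save': 0,
--     'welcome': 1, 'hello': 1, 'hi': 1, 'greetings': 1,
--     'update': 2, 'news': 2, 'newsletter': 2, 'announcement': 2,
--     'urgent': 3, 'important': 3, 'action required': 3, 'expires': 3,
-- }
-- _NAMES = ["Promotional", "Welcome", "Newsletter", "Urgent"]
--
-- def _categorize_subject(subject: str) -> str:
--     s = subject.lower()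
--     best = min((p for k, p in _KEYWORD_PRIORITY.items() if k in s), default=None)
--     if best is None:
--         return "Question" if '?' in subject else "General"
--     return _NAMES[best]
-- ===== Notes on version B (the rewrite author's own statement) =====
-- stated objective: alternative
-- what changed: Instead of A's ordered if/elif chain of category tests with short-circuiting, B scores every keyword in one flat keyword->priority map, takes the minimum priority among all matching keywords, and maps that priority to the category name; the question-mark/General fallback applies only when no keyword matches.
import Mathlib
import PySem

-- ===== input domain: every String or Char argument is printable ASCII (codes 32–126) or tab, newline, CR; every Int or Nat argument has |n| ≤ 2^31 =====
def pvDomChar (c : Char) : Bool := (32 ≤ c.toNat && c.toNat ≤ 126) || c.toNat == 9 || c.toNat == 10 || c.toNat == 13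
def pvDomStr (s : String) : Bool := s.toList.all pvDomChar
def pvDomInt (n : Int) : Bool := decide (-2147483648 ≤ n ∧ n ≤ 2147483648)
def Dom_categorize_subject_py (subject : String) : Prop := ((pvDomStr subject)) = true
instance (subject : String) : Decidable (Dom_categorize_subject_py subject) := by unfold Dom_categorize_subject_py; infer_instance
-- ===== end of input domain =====

-- B replaces A's ordered if/elif chain by a flat keyword→priority table, taking the
-- minimum priority among all matching keywords; alternative decomposition, same cost.

-- ===== PORT A =====
def categorize_subject_py (subject : String) : String :=
  let subject_lower := PySem.Str.lower subject
  if ["offer", "sale", "discount", "deal", "%", "save"].any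
      (fun word => PySem.Str.isIn word subject_lower) then "Promotional"
  else if ["welcome", "hello", "hi", "greetings"].any
      (fun word => PySem.Str.isIn word subject_lower) then "Welcome"
  else if ["update", "news", "newsletter", "announcement"].any
      (fun word => PySem.Str.isIn word subject_lower) then "Newsletter"
  else if ["urgent", "important", "action required", "expires"].any
      (fun word => PySem.Str.isIn word subject_lower) then "Urgent"
  else if PySem.Str.isIn "?" subject then "Question"
  else "General"

-- ===== PORT B =====
-- the dict literal _KEYWORD_PRIORITY as an association list in insertion order
def pvKeywordPrio : List (String × Nat) :=
  [("offer", 0), ("sale", 0), ("discount", 0), ("deal", 0), ("%", 0), ("save", 0),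
   ("welcome", 1), ("hello", 1), ("hi", 1), ("greetings", 1),
   ("update", 2), ("news", 2), ("newsletter", 2), ("announcement", 2),
   ("urgent", 3), ("important", 3), ("action required", 3), ("expires", 3)]

def pvNames : List String := ["Promotional", "Welcome", "Newsletter", "Urgent"]

-- one step of min((p for k, p in … if k in s), default=None)
def pvMinStep (s : String) (best : Option Nat) (kp : String × Nat) : Option Nat :=
  if PySem.Str.isIn kp.1 s then
    match best with
    | none => some kp.2
    | some b => some (min b kp.2)
  else best

-- min over the matching priorities, None if no keyword matches
def pvBestPrio (s : String) : Option Nat :=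
  pvKeywordPrio.foldl (pvMinStep s) none

def categorize_subject_py_alt (subject : String) : String :=
  let s := PySem.Str.lower subject
  match pvBestPrio s with
  | none => if PySem.Str.isIn "?" subject then "Question" else "General"
  | some b => pvNames.getD b "General"  -- _NAMES[best]; b < 4 always, default unused

-- ===== PRECONDITION & SPEC =====
def Spec_categorize_subject_py (subject : String) (out : String) : Prop := out = categorize_subject_py_alt subject
instance (subject : String) (out : String) : Decidable (Spec_categorize_subject_py subject out) := by unfold Spec_categorize_subject_py; infer_instance

-- ===== CLAIM (what is proved, stated in full; the proofs are below) =====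
def Claim_equal_categorize_subject_py : Prop := ∀ (subject : String), Dom_categorize_subject_py subject → Spec_categorize_subject_py subject (categorize_subject_py subject)

-- ===== LEMMAS AND PROOFS =====

-- once a minimum b is held, keywords of priority ≥ b can never lower it
theorem pvFold_some (s : String) (b : Nat) (l : List (String × Nat))
    (h : ∀ kp ∈ l, b ≤ kp.2) : l.foldl (pvMinStep s) (some b) = some b := by
  induction l with
  | nil => rfl
  | cons kp rest ih =>
      have hb : b ≤ kp.2 := h kp (List.mem_cons_self ..)
      have hrest : ∀ kp ∈ rest, b ≤ kp.2 := fun x hx => h x (List.mem_cons_of_mem _ hx)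
      simp only [List.foldl_cons, pvMinStep]
      split_ifs with hin
      · simp only [Nat.min_eq_left hb]; exact ih hrest
      · exact ih hrest

-- folding a uniform-priority group from none: some p iff the group has a match
theorem pvFold_group (s : String) (p : Nat) (g : List String) :
    (g.map (fun k => (k, p))).foldl (pvMinStep s) none
      = if g.any (fun k => PySem.Str.isIn k s) then some p else none := by
  induction g with
  | nil => rfl
  | cons k g ih =>
      simp only [List.map_cons, List.foldl_cons, List.any_cons, pvMinStep]
      by_cases hin : PySem.Str.isIn k s
      · simp only [hin, ite_true, Bool.true_or]
        exact pvFold_some s p _ (by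
          intro kp hkp
          obtain ⟨x, _, hx⟩ := List.mem_map.mp hkp
          simp [← hx])
      · simp only [hin, ite_false, Bool.false_or]
        exact ih

def pvG0 : List String := ["offer", "sale", "discount", "deal", "%", "save"]
def pvG1 : List String := ["welcome", "hello", "hi", "greetings"]
def pvG2 : List String := ["update", "news", "newsletter", "announcement"]
def pvG3 : List String := ["urgent", "important", "action required", "expires"]

theorem pvKeywordPrio_groups :
    pvKeywordPrio = pvG0.map (fun k => (k, 0)) ++ pvG1.map (fun k => (k, 1))
      ++ pvG2.map (fun k => (k, 2)) ++ pvG3.map (fun k => (k, 3)) := by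
  rfl

theorem pvFold_some_map (s : String) (b p : Nat) (g : List String) (h : b ≤ p) :
    (g.map (fun k => (k, p))).foldl (pvMinStep s) (some b) = some b :=
  pvFold_some s b _ (by
    intro kp hkp
    obtain ⟨x, _, hx⟩ := List.mem_map.mp hkp
    simp [← hx, h])

theorem pvBestPrio_eq (s : String) :
    pvBestPrio s
      = if pvG0.any (fun k => PySem.Str.isIn k s) then some 0
        else if pvG1.any (fun k => PySem.Str.isIn k s) then some 1
        else if pvG2.any (fun k => PySem.Str.isIn k s) then some 2
        else if pvG3.any (fun k => PySem.Str.isIn k s) then some 3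
        else none := by
  unfold pvBestPrio
  rw [pvKeywordPrio_groups]
  rw [List.foldl_append, List.foldl_append, List.foldl_append]
  rw [pvFold_group]
  by_cases h0 : pvG0.any (fun k => PySem.Str.isIn k s)
  · rw [if_pos h0, if_pos h0,
      pvFold_some_map s 0 1 _ (by norm_num),
      pvFold_some_map s 0 2 _ (by norm_num),
      pvFold_some_map s 0 3 _ (by norm_num)]
  · rw [if_neg h0, if_neg h0, pvFold_group]
    by_cases h1 : pvG1.any (fun k => PySem.Str.isIn k s)
    · rw [if_pos h1, if_pos h1,
        pvFold_some_map s 1 2 _ (by norm_num),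
        pvFold_some_map s 1 3 _ (by norm_num)]
    · rw [if_neg h1, if_neg h1, pvFold_group]
      by_cases h2 : pvG2.any (fun k => PySem.Str.isIn k s)
      · rw [if_pos h2, if_pos h2, pvFold_some_map s 2 3 _ (by norm_num)]
      · rw [if_neg h2, if_neg h2, pvFold_group]

-- ===== VERDICT (by name: the statement is the Claim_ definition above) =====
theorem categorize_subject_py_spec : Claim_equal_categorize_subject_py := by
  intro subject _
  unfold Spec_categorize_subject_py categorize_subject_py categorize_subject_py_alt
  simp only [pvBestPrio_eq, pvG0, pvG1, pvG2, pvG3]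
  split_ifs <;> simp_all [pvNames]
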